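-- pv_equiv track=rewrite | github.com/harrietobrien/Leetcode | python/lexicoPermute.py | lexicoPermute
-- ===== SOURCE A (Python) =====
-- def lexicoPermute(s):
--     a = sorted(s)
--     n = len(a) - 1
--     while True:
--         yield ''.join(a)
--         # find the largest index j such that a[j] < a[j + 1]
--         for j in range(n - 1, -1, -1):
--             if a[j] < a[j + 1]:
--                 break
--         else:
--             return
--         # find the largest index k > j such that a[j] < a[k]
--         v = a[j]
--         for k in range(n, j, -1):
--             if v < a[k]:
--                 break
--         # swap the value of a[j] with that of a[k]
--         a[j], a[k] = a[k], a[j]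
--         # reverse the tail of the sequence
--         a[j + 1:] = a[j + 1:][::-1]
-- ===== SOURCE B (Python) =====
-- def lexicoPermute(s):
--     # Recursive generation: walk the distinct symbols of the sorted remaining
--     # multiset in order, emitting prefix+symbol recursively; no next-permutation scans.
--     def distinct(m):
--         # first element of each run of equal elements
--         if not m:
--             return []
--         c = m[0]
--         i = 1
--         while i < len(m) and m[i] == c:
--             i += 1
--         return [c] + distinct(m[i:])
--
--     def gen(m, prefix):
--         if not m:
--             yield prefix
--             return
--         for c in distinct(m):
--             rest = list(m)
--             rest.remove(c)
--             yield from gen(rest, prefix + c)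
--
--     yield from gen(sorted(s), '')
-- ===== Notes on version B (the rewrite author's own statement) =====
-- stated objective: alternative
-- what changed: Replaces the iterative next-permutation machinery (descending index scans, swap, tail reversal) with a recursive generator that walks the distinct symbols of the sorted remaining multiset and extends the prefix, which yields the same distinct permutations in the same lexicographic order.
import Mathlib
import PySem

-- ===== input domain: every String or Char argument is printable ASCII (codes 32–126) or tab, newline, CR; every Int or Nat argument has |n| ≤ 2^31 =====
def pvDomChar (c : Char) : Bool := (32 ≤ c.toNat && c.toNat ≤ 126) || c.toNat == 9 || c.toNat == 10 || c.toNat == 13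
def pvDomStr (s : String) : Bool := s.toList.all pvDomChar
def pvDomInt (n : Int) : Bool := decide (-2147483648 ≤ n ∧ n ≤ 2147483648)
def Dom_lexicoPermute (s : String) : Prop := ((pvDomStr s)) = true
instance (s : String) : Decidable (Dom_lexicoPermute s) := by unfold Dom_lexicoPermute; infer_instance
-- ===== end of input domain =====

-- B replaces A's iterative next-permutation machinery (descending index scans, swap,
-- tail reversal) by a recursive generator over the distinct symbols of the sorted
-- remaining multiset; same distinct permutations in the same lexicographic order
-- (objective: alternative decomposition, no speed claim).

-- ===== PORT A =====
-- 'for j in range(n - 1, -1, -1): if a[j] < a[j + 1]: break / else: return'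
-- scanned as a downward recursion from the range's first element; a.getD is exact
-- here because every index probed is in range whenever the scan is invoked.
def pvScanJ (a : List Char) (j : Nat) : Option Nat :=
  if a.getD j ' ' < a.getD (j+1) ' ' then some j
  else match j with
    | 0 => none
    | j'+1 => pvScanJ a j'

-- 'for k in range(n, j, -1): if v < a[k]: break' — Python is guaranteed to break
-- here (a[j+1] > v); the k ≤ j+1 arm just returns the last loop value as Python would.
def pvScanK (a : List Char) (v : Char) (j k : Nat) : Nat :=
  if v < a.getD k ' ' then k
  else if k ≤ j+1 then k
  else pvScanK a v j (k-1)

-- the swap a[j],a[k] = a[k],a[j] and the slice assignment a[j+1:] = a[j+1:][::-1];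
-- take/drop is exact for the nonneg in-range slice bound j+1.
def pvStep (a : List Char) (j : Nat) : List Char :=
  let v := a.getD j ' '
  let k := pvScanK a v j (a.length - 1)
  let a1 := (a.set j (a.getD k ' ')).set k v
  a1.take (j+1) ++ (a1.drop (j+1)).reverse

-- the 'while True' loop; fuel (n! + 1) is a totality guard only, proved sufficient
-- below (the loop emits at most one string per distinct permutation).
def pvLoop : Nat → List Char → List String
  | 0, _ => []
  | f+1, a =>
    String.ofList a ::
      (match (if 2 ≤ a.length then pvScanJ a (a.length - 2) else none) with
       | none => []
       | some j => pvLoop f (pvStep a j))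

def lexicoPermute (s : String) : List String :=
  let a := PySem.List.sorted s.toList (fun c => c) false
  pvLoop (a.length.factorial + 1) a

-- ===== PORT B =====
-- Source B's distinct(): first element of each run of equal elements
def pvDistinct : List Char → List Char
  | [] => []
  | c :: t => c :: pvDistinct (t.dropWhile (fun x => x == c))
termination_by m => m.length
decreasing_by simp only [List.length_cons]; exact Nat.lt_succ_of_le (List.length_dropWhile_le _ _)

-- needed by pvGen's decreasing_by
theorem mem_of_mem_pvDistinct {c : Char} {m : List Char} (h : c ∈ pvDistinct m) : c ∈ m := by
  induction m using pvDistinct.induct with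
  | case1 => simp [pvDistinct] at h
  | case2 x t ih =>
    simp only [pvDistinct, List.mem_cons] at h
    rcases h with h | h
    · simp [h]
    · exact List.mem_cons_of_mem _ ((List.dropWhile_sublist _).mem (ih h))

-- Source B's gen(): for each distinct symbol, recurse on the multiset minus its first
-- occurrence (Python's list.remove = List.erase) with the symbol appended to the prefix.
def pvGen : List Char → String → List String
  | [], pre => [pre]
  | c :: t, pre =>
    (pvDistinct (c :: t)).attach.flatMap (fun x => pvGen ((c :: t).erase x.1) (pre.push x.1))
termination_by m _ => m.length
decreasing_by
  have h1 := mem_of_mem_pvDistinct x.2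
  have h2 := List.length_erase_of_mem h1
  simp only [h2, List.length_cons]
  omega

def lexicoPermute_alt (s : String) : List String :=
  pvGen (PySem.List.sorted s.toList (fun c => c) false) ""

-- ===== PRECONDITION & SPEC =====
def Spec_lexicoPermute (s : String) (out : List String) : Prop := out = lexicoPermute_alt s
instance (s : String) (out : List String) : Decidable (Spec_lexicoPermute s out) := by unfold Spec_lexicoPermute; infer_instance

-- ===== CLAIM (what is proved, stated in full; the proofs are below) =====
def Claim_equal_lexicoPermute : Prop := ∀ (s : String), Dom_lexicoPermute s → Spec_lexicoPermute s (lexicoPermute s)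

-- ===== LEMMAS AND PROOFS =====

theorem pv_flatMap_attach {α β : Type} (l : List α) (g : α → List β) :
    l.attach.flatMap (fun x => g x.1) = l.flatMap g := by
  rw [List.flatMap, List.flatMap]
  congr 1
  have : (fun x : {x // x ∈ l} => g x.1) = g ∘ Subtype.val := rfl
  rw [this, ← List.map_map, List.attach_map_subtype_val]

-- permsS m : the list-of-char-lists skeleton of pvGen (prefix factored out)
def permsS : List Char → List (List Char)
  | [] => [[]]
  | c :: t =>
    (pvDistinct (c :: t)).attach.flatMap (fun x => (permsS ((c :: t).erase x.1)).map (x.1 :: ·))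
termination_by m => m.length
decreasing_by
  have h1 := mem_of_mem_pvDistinct x.2
  have h2 := List.length_erase_of_mem h1
  simp only [h2, List.length_cons]
  omega

theorem permsS_cons (c : Char) (t : List Char) :
    permsS (c :: t) =
      (pvDistinct (c :: t)).flatMap (fun x => (permsS ((c :: t).erase x)).map (x :: ·)) := by
  rw [permsS]
  exact pv_flatMap_attach _ (fun v => (permsS ((c :: t).erase v)).map (v :: ·))

theorem pvGen_eq (m : List Char) (pre : String) :
    pvGen m pre = (permsS m).map (fun t => pre ++ String.ofList t) := by
  induction m, pre using pvGen.induct with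
  | case1 pre =>
    rw [pvGen, permsS]
    simp only [List.map]
    congr 1
    apply String.ext; simp
  | case2 c t pre ih =>
    rw [pvGen, pv_flatMap_attach _ (fun v => pvGen ((c :: t).erase v) (pre.push v)), permsS_cons,
      List.map_flatMap]
    apply List.flatMap_congr
    intro x hx
    rw [ih ⟨x, hx⟩, List.map_map]
    apply List.map_congr_left
    intro u hu
    apply String.ext; simp

-- ---- pvDistinct facts ----
theorem pvDistinct_sublist (m : List Char) : List.Sublist (pvDistinct m) m := by
  induction m using pvDistinct.induct with
  | case1 => simp [pvDistinct]
  | case2 c t ih =>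
    rw [pvDistinct]
    exact List.Sublist.cons₂ c (ih.trans (List.dropWhile_sublist _))

theorem mem_pvDistinct {x : Char} {m : List Char} : x ∈ pvDistinct m ↔ x ∈ m := by
  constructor
  · exact mem_of_mem_pvDistinct
  · intro hx
    induction m using pvDistinct.induct with
    | case1 => simp at hx
    | case2 c t ih =>
      rw [pvDistinct]
      rcases List.mem_cons.1 hx with h | h
      · simp [h]
      · by_cases hxc : x = c
        · simp [hxc]
        · refine List.mem_cons_of_mem _ (ih ?_)
          have := (List.takeWhile_append_dropWhile (p := fun y => y == c) (l := t)).symm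
          rw [this] at h
          rcases List.mem_append.1 h with h1 | h1
          · exact absurd (by simpa using List.mem_takeWhile_imp h1) hxc
          · exact h1

theorem pvDistinct_pairwise {m : List Char} (h : m.Pairwise (· ≤ ·)) :
    (pvDistinct m).Pairwise (· < ·) := by
  induction m using pvDistinct.induct with
  | case1 => simp [pvDistinct]
  | case2 c t ih =>
    rw [pvDistinct]
    rcases h with - | ⟨hle, hp⟩
    have hdw : (t.dropWhile (fun x => x == c)).Pairwise (· ≤ ·) :=
      hp.sublist (List.dropWhile_sublist _)
    refine List.Pairwise.cons ?_ (ih hdw)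
    intro y hy
    have hyd : y ∈ t.dropWhile (fun x => x == c) := mem_of_mem_pvDistinct hy
    -- c < head of dropWhile ≤ y
    rcases hd : t.dropWhile (fun x => x == c) with - | ⟨h0, rest⟩
    · rw [hd] at hyd; simp at hyd
    · have hh0 : ¬ (h0 == c) = true := by
        have := List.head?_dropWhile_not (p := fun x => x == c) (l := t)
        rw [hd] at this; simpa using this
      have hch0 : c < h0 := by
        have hcle : c ≤ h0 := hle _ ((List.dropWhile_sublist _).mem (by rw [hd]; exact List.mem_cons_self))
        rcases lt_or_eq_of_le hcle with h | h
        · exact h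
        · exact absurd (by simp [h]) hh0
      rw [hd] at hyd hdw
      rcases List.mem_cons.1 hyd with h | h
      · exact h ▸ hch0
      · exact lt_of_lt_of_le hch0 (List.rel_of_pairwise_cons hdw h)

-- ---- order lemmas ----
theorem sorted_le_perm {l : List Char} (h : l.Pairwise (· ≤ ·)) :
    ∀ t : List Char, t.Perm l → l ≤ t := by
  induction l with
  | nil => intro t ht; rw [ht.eq_nil]
  | cons x l' ih =>
    intro t ht
    rcases h with - | ⟨hle, hp⟩
    rcases t with - | ⟨y, t'⟩
    · exact absurd ht.symm.eq_nil (by simp)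
    · by_cases hyx : y = x
      · subst hyx
        have ht' : t'.Perm l' := ht.cons_inv
        exact List.cons_le_cons _ (ih hp t' ht')
      · have hy : y ∈ x :: l' := ht.mem_iff.1 List.mem_cons_self
        have hxy : x < y := by
          rcases List.mem_cons.1 hy with h | h
          · exact absurd h hyx
          · exact lt_of_le_of_ne (hle _ h) (fun hc => hyx hc.symm)
        exact le_of_lt (List.Lex.rel hxy)

theorem desc_ge_perm {l : List Char} (h : l.Pairwise (fun x y => y ≤ x)) :
    ∀ t : List Char, t.Perm l → t ≤ l := by
  induction l with
  | nil => intro t ht; rw [ht.eq_nil]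
  | cons x l' ih =>
    intro t ht
    rcases h with - | ⟨hge, hp⟩
    rcases t with - | ⟨y, t'⟩
    · exact absurd ht.symm.eq_nil (by simp)
    · by_cases hyx : y = x
      · subst hyx
        have ht' : t'.Perm l' := ht.cons_inv
        exact List.cons_le_cons _ (ih hp t' ht')
      · have hy : y ∈ x :: l' := ht.mem_iff.1 List.mem_cons_self
        have hxy : y < x := by
          rcases List.mem_cons.1 hy with h | h
          · exact absurd h hyx
          · exact lt_of_le_of_ne (hge _ h) hyx
        exact le_of_lt (List.Lex.rel hxy)

-- ---- permsS facts ----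
theorem pairwise_flatMap {α β : Type} {R : β → β → Prop} {L : List α} {f : α → List β}
    (hinner : ∀ a ∈ L, (f a).Pairwise R)
    (hcross : L.Pairwise (fun a b => ∀ x ∈ f a, ∀ y ∈ f b, R x y)) :
    (L.flatMap f).Pairwise R := by
  induction L with
  | nil => simp
  | cons a L ih =>
    rw [List.flatMap_cons, List.pairwise_append]
    rcases hcross with - | ⟨hc, hcr⟩
    refine ⟨hinner a List.mem_cons_self, ih (fun b hb => hinner b (List.mem_cons_of_mem _ hb)) hcr, ?_⟩
    intro x hx y hy
    rcases List.mem_flatMap.1 hy with ⟨b, hb, hyb⟩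
    exact hc b hb x hx y hyb

theorem mem_permsS_aux (n : Nat) : ∀ (m : List Char), m.length ≤ n → m.Pairwise (· ≤ ·) →
    ∀ t, (t ∈ permsS m ↔ t.Perm m) := by
  induction n with
  | zero =>
    intro m hlen _ t
    match m with
    | [] => rw [permsS]; simp
  | succ n ih =>
    intro m hlen hs t
    match m with
    | [] => rw [permsS]; simp
    | c :: mt =>
      have herl : ∀ x ∈ c :: mt, ((c :: mt).erase x).length ≤ n := by
        intro x hx
        rw [List.length_erase_of_mem hx]
        simp only [List.length_cons] at hlen ⊢
        omega
      have hers : ∀ x : Char, ((c :: mt).erase x).Pairwise (· ≤ ·) :=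
        fun x => hs.sublist (List.erase_sublist)
      rw [permsS_cons, List.mem_flatMap]
      constructor
      · rintro ⟨x, hx, ht⟩
        rcases List.mem_map.1 ht with ⟨r, hr, rfl⟩
        have hxm : x ∈ c :: mt := mem_pvDistinct.1 hx
        have hrp : r.Perm ((c :: mt).erase x) := (ih _ (herl x hxm) (hers x) r).1 hr
        exact (hrp.cons x).trans (List.perm_cons_erase hxm).symm
      · intro htp
        rcases t with - | ⟨y, r⟩
        · exact absurd htp.symm.eq_nil (by simp)
        · have hym : y ∈ c :: mt := htp.mem_iff.1 List.mem_cons_self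
          refine ⟨y, mem_pvDistinct.2 hym, List.mem_map.2 ⟨r, ?_, rfl⟩⟩
          have hr : r.Perm ((c :: mt).erase y) :=
            (htp.trans (List.perm_cons_erase hym)).cons_inv
          exact (ih _ (herl y hym) (hers y) r).2 hr

theorem mem_permsS {m : List Char} (hs : m.Pairwise (· ≤ ·)) :
    ∀ t, t ∈ permsS m ↔ t.Perm m :=
  mem_permsS_aux m.length m le_rfl hs

theorem permsS_pairwise_aux (n : Nat) : ∀ (m : List Char), m.length ≤ n → m.Pairwise (· ≤ ·) →
    (permsS m).Pairwise (· < ·) := by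
  induction n with
  | zero =>
    intro m hlen _
    match m with
    | [] => rw [permsS]; simp
  | succ n ih =>
    intro m hlen hs
    match m with
    | [] => rw [permsS]; simp
    | c :: mt =>
      rw [permsS_cons]
      apply pairwise_flatMap
      · intro x hx
        have hxm : x ∈ c :: mt := mem_pvDistinct.1 hx
        have : ((c :: mt).erase x).length ≤ n := by
          rw [List.length_erase_of_mem hxm]
          simp only [List.length_cons] at hlen ⊢
          omega
        have hp := ih _ this (hs.sublist List.erase_sublist)
        rw [List.pairwise_map]
        exact hp.imp (fun h => List.Lex.cons h)
      · have := pvDistinct_pairwise hs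
        refine this.imp_of_mem ?_
        intro x y _ _ hxy u hu v hv
        rcases List.mem_map.1 hu with ⟨u', _, rfl⟩
        rcases List.mem_map.1 hv with ⟨v', _, rfl⟩
        exact List.Lex.rel hxy

theorem permsS_pairwise {m : List Char} (hs : m.Pairwise (· ≤ ·)) :
    (permsS m).Pairwise (· < ·) :=
  permsS_pairwise_aux m.length m le_rfl hs

theorem permsS_length_aux (n : Nat) : ∀ (m : List Char), m.length ≤ n →
    (permsS m).length ≤ m.length.factorial := by
  induction n with
  | zero =>
    intro m hlen
    match m with
    | [] => rw [permsS]; simp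
  | succ n ih =>
    intro m hlen
    match m with
    | [] => rw [permsS]; simp
    | c :: mt =>
      rw [permsS_cons, List.length_flatMap]
      have hbound : ∀ b ∈ (pvDistinct (c :: mt)).map
          (fun x => ((permsS ((c :: mt).erase x)).map (x :: ·)).length), b ≤ mt.length.factorial := by
        intro b hb
        rcases List.mem_map.1 hb with ⟨x, hx, rfl⟩
        have hxm : x ∈ c :: mt := mem_pvDistinct.1 hx
        have h1 : ((c :: mt).erase x).length ≤ n := by
          rw [List.length_erase_of_mem hxm]
          simp only [List.length_cons] at hlen ⊢
          omega
        have h2 := ih _ h1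
        rw [List.length_map]
        rw [List.length_erase_of_mem hxm] at h2
        simpa using h2
      calc ((pvDistinct (c :: mt)).map _).sum
          ≤ ((pvDistinct (c :: mt)).map
              (fun x => ((permsS ((c :: mt).erase x)).map (x :: ·)).length)).length • mt.length.factorial :=
            List.sum_le_card_nsmul _ _ hbound
        _ ≤ (c :: mt).length * mt.length.factorial := by
            rw [smul_eq_mul, List.length_map]
            exact Nat.mul_le_mul_right _ ((pvDistinct_sublist _).length_le)
        _ = (c :: mt).length.factorial := by
            simp [List.length_cons, Nat.factorial_succ]

theorem permsS_length (m : List Char) : (permsS m).length ≤ m.length.factorial :=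
  permsS_length_aux m.length m le_rfl

-- ---- scan specifications ----
theorem pvScanJ_none {a : List Char} {j : Nat} (h : pvScanJ a j = none) :
    ∀ i, i ≤ j → ¬ a.getD i ' ' < a.getD (i+1) ' ' := by
  induction j with
  | zero =>
    rw [pvScanJ] at h
    by_cases hc : a.getD 0 ' ' < a.getD 1 ' '
    · rw [if_pos hc] at h; exact absurd h (by simp)
    · intro i hi
      interval_cases i
      exact hc
  | succ j ih =>
    rw [pvScanJ] at h
    by_cases hc : a.getD (j+1) ' ' < a.getD (j+2) ' '
    · rw [if_pos hc] at h; exact absurd h (by simp)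
    · rw [if_neg hc] at h
      intro i hi
      rcases Nat.lt_or_ge i (j+1) with h1 | h1
      · exact ih h i (by omega)
      · have : i = j + 1 := by omega
        subst this
        exact hc

theorem pvScanJ_some {a : List Char} {j i : Nat} (h : pvScanJ a j = some i) :
    i ≤ j ∧ a.getD i ' ' < a.getD (i+1) ' ' ∧
      ∀ i', i < i' → i' ≤ j → ¬ a.getD i' ' ' < a.getD (i'+1) ' ' := by
  induction j with
  | zero =>
    rw [pvScanJ] at h
    by_cases hc : a.getD 0 ' ' < a.getD 1 ' '
    · rw [if_pos hc] at h
      cases h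
      exact ⟨le_rfl, hc, by omega⟩
    · rw [if_neg hc] at h; exact absurd h (by simp)
  | succ j ih =>
    rw [pvScanJ] at h
    by_cases hc : a.getD (j+1) ' ' < a.getD (j+2) ' '
    · rw [if_pos hc] at h
      cases h
      exact ⟨le_rfl, hc, by omega⟩
    · rw [if_neg hc] at h
      obtain ⟨h1, h2, h3⟩ := ih h
      refine ⟨by omega, h2, ?_⟩
      intro i' hi1 hi2
      rcases Nat.lt_or_ge i' (j+1) with h4 | h4
      · exact h3 i' hi1 (by omega)
      · have : i' = j + 1 := by omega
        subst this
        exact hc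

theorem pvScanK_spec {a : List Char} {v : Char} {j k : Nat}
    (hk : j + 1 ≤ k) (hgt : v < a.getD (j+1) ' ') :
    j + 1 ≤ pvScanK a v j k ∧ pvScanK a v j k ≤ k ∧ v < a.getD (pvScanK a v j k) ' ' ∧
      ∀ q, pvScanK a v j k < q → q ≤ k → ¬ v < a.getD q ' ' := by
  induction k using Nat.strong_induction_on with
  | _ k ih =>
    rw [pvScanK]
    by_cases hc : v < a.getD k ' '
    · rw [if_pos hc]
      exact ⟨hk, le_rfl, hc, by omega⟩
    · rw [if_neg hc]
      by_cases hk1 : k ≤ j + 1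
      · exfalso
        have : k = j + 1 := by omega
        subst this
        exact hc hgt
      · rw [if_neg hk1]
        obtain ⟨h1, h2, h3, h4⟩ := ih (k-1) (by omega) (by omega)
        refine ⟨h1, by omega, h3, ?_⟩
        intro q hq1 hq2
        rcases Nat.lt_or_ge q k with h5 | h5
        · exact h4 q hq1 (by omega)
        · have : q = k := by omega
          subst this
          exact hc

-- ---- the next-permutation step: structural properties ----
theorem lex_append_left (u : List Char) {l1 l2 : List Char} (h : l1 < l2) :
    u ++ l1 < u ++ l2 := by
  induction u with
  | nil => exact h
  | cons w u' ih => exact List.Lex.cons ih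

theorem key_min {x y : Char} {d e : List Char}
    (hesort : e.Pairwise (· ≤ ·)) (hperm : (y :: e).Perm (x :: d))
    (hdmax : d.Pairwise (fun a b => b ≤ a)) (hminy : ∀ z ∈ d, x < z → y ≤ z) :
    ∀ (u t : List Char), t.Perm (u ++ x :: d) → u ++ x :: d < t → u ++ y :: e ≤ t := by
  intro u
  induction u with
  | nil =>
    intro t htp htlt
    rcases t with - | ⟨z, t'⟩
    · cases htlt
    · simp only [List.nil_append] at htp htlt ⊢
      rcases htlt with - | h | h
      · -- x < z
        have hz : z ∈ x :: d := htp.mem_iff.1 List.mem_cons_self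
        have hyz : y ≤ z := by
          rcases List.mem_cons.1 hz with h1 | h1
          · exact absurd (h1 ▸ h) (lt_irrefl x)
          · exact hminy z h1 h
        rcases lt_or_eq_of_le hyz with h2 | h2
        · exact le_of_lt (List.Lex.rel h2)
        · subst h2
          have ht' : t'.Perm e := (htp.trans hperm.symm).cons_inv
          exact List.cons_le_cons _ (sorted_le_perm hesort t' ht')
      · -- heads equal (= x), d < t'
        have ht' : t'.Perm d := htp.cons_inv
        exact absurd h (not_lt.2 (desc_ge_perm hdmax t' ht'))
  | cons w u' ih =>
    intro t htp htlt
    rcases t with - | ⟨z, t'⟩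
    · cases htlt
    · rcases htlt with - | h | h
      · exact le_of_lt (List.Lex.rel h)
      · have ht' : t'.Perm (u' ++ x :: d) := htp.cons_inv
        exact List.cons_le_cons _ (ih t' ht' h)

theorem pv_getElem_congr {l : List Char} {i j : Nat} (h : i = j) (hj : j < l.length) :
    l[i]'(h ▸ hj) = l[j] := by subst h; rfl

theorem step_master {a : List Char} {j : Nat} (hlen : 2 ≤ a.length)
    (hj : pvScanJ a (a.length - 2) = some j) :
    (pvStep a j).Perm a ∧ a < pvStep a j ∧ ∀ t : List Char, t.Perm a → a < t → pvStep a j ≤ t := by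
  obtain ⟨hjle, hasc, hno⟩ := pvScanJ_some hj
  have hjlt : j < a.length := by omega
  have hj1lt : j + 1 < a.length := by omega
  set u := a.take j with hu
  set x := a[j]'hjlt with hx
  set d := a.drop (j+1) with hd
  have hulen : u.length = j := List.length_take_of_le (by omega)
  have hdlen : d.length = a.length - (j+1) := List.length_drop ..
  have hdpos : 0 < d.length := by omega
  have ha : a = u ++ x :: d := by
    rw [hu, hx, hd, ← List.drop_eq_getElem_cons hjlt, List.take_append_drop]
  have hdget : ∀ (q : Nat) (hq : q < d.length), d[q] = a[j+1+q]'(by rw [hdlen] at hq; omega) := by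
    intro q hq
    simp only [hd, List.getElem_drop]
  have hgetD : ∀ (i : Nat) (hi : i < a.length), a.getD i ' ' = a[i] :=
    fun i hi => List.getD_eq_getElem a ' ' hi
  -- d is weakly decreasing
  have hdmax : d.Pairwise (fun p q => q ≤ p) := by
    apply List.IsChain.pairwise
    rw [List.isChain_iff_getElem]
    intro i hi
    have hilen : j + 1 + i + 1 < a.length := by rw [hdlen] at hi; omega
    have h3 := hno (j+1+i) (by omega) (by omega)
    rw [hgetD _ (by omega), hgetD _ (by omega)] at h3
    rw [hdget i (by omega), hdget (i+1) (by omega)]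
    simp only [Nat.add_assoc] at h3 ⊢
    exact not_lt.1 h3
  -- scanK
  have hscank := pvScanK_spec (a := a) (v := a.getD j ' ') (j := j) (k := a.length - 1)
    (by omega) hasc
  set k := pvScanK a (a.getD j ' ') j (a.length - 1) with hk
  obtain ⟨hk1, hk2, hk3, hk4⟩ := hscank
  have hklt : k < a.length := by omega
  set p := k - (j+1) with hp
  have hplt : p < d.length := by rw [hdlen]; omega
  set y := d[p]'hplt with hy
  have hay : a[k]'hklt = y := by
    rw [hy, hdget p hplt, pv_getElem_congr (by omega : k = j+1+p)]
  have hxy : x < y := by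
    rw [← hay, hx]
    rw [hgetD j hjlt, hgetD k hklt] at hk3
    exact hk3
  have hdtail : ∀ (q : Nat) (hq : q < d.length), p < q → d[q] ≤ x := by
    intro q hq hpq
    have hqlen : j + 1 + q < a.length := by rw [hdlen] at hq; omega
    have h1 := hk4 (j+1+q) (by omega) (by omega)
    rw [hgetD j hjlt, hgetD _ hqlen] at h1
    rw [hdget q hq, hx]
    exact not_lt.1 h1
  -- the modified tail is still weakly decreasing
  have hsetmax : (d.set p x).Pairwise (fun a b => b ≤ a) := by
    rw [List.pairwise_iff_getElem] at hdmax ⊢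
    intro i1 i2 hi1 hi2 hlt12
    rw [List.length_set] at hi1 hi2
    rw [List.getElem_set, List.getElem_set]
    by_cases e1 : p = i1
    · subst e1
      rw [if_pos rfl, if_neg (by omega : ¬ p = i2)]
      exact hdtail i2 hi2 hlt12
    · by_cases e2 : p = i2
      · subst e2
        rw [if_neg e1, if_pos rfl]
        refine le_of_lt (lt_of_lt_of_le hxy ?_)
        rw [hy]
        exact hdmax i1 p hi1 hplt (by omega)
      · rw [if_neg e1, if_neg e2]
        exact hdmax i1 i2 hi1 hi2 hlt12
  have hesort : (d.set p x).reverse.Pairwise (· ≤ ·) := List.pairwise_reverse.2 hsetmax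
  -- the permutation between old and new tails
  have hsetperm : (y :: d.set p x).Perm (x :: d) := by
    have hdsplit : d = d.take p ++ y :: d.drop (p+1) := by
      rw [hy, ← List.drop_eq_getElem_cons hplt, List.take_append_drop]
    have hset : d.set p x = d.take p ++ x :: d.drop (p+1) := by
      rw [List.set_eq_take_append_cons_drop, if_pos hplt]
    rw [hset]
    refine ((List.Perm.cons y List.perm_middle).trans (List.Perm.swap x y _)).trans ?_
    conv_rhs => rw [hdsplit]
    exact List.Perm.cons x List.perm_middle.symm
  -- minimality of y among elements of d exceeding x
  have hminy : ∀ z ∈ d, x < z → y ≤ z := by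
    intro z hz hxz
    rcases List.mem_iff_getElem.1 hz with ⟨q, hq, rfl⟩
    rcases Nat.lt_or_ge p q with h5 | h5
    · exact absurd hxz (not_lt.2 (hdtail q hq h5))
    · rcases Nat.lt_or_ge q p with h6 | h6
      · rw [hy]
        exact (List.pairwise_iff_getElem.1 hdmax) q p hq hplt h6
      · have : q = p := by omega
        subst this
        exact le_of_eq hy
  -- compute pvStep
  have hstep : pvStep a j = u ++ y :: (d.set p x).reverse := by
    rw [pvStep]
    simp only [← hk]
    have hgk : a.getD k ' ' = y := by rw [hgetD k hklt, hay]
    have hgj : a.getD j ' ' = x := by rw [hgetD j hjlt, hx]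
    rw [hgk, hgj]
    have ha1 : (a.set j y).set k x = u ++ y :: d.set p x := by
      conv_lhs => rw [ha]
      rw [List.set_append_right j y (by omega), List.set_append_right k x (by omega)]
      congr 1
      rw [hulen, Nat.sub_self, List.set_cons_zero]
      have h2 : k - j = p + 1 := by omega
      rw [h2]
      rfl
    rw [ha1, show u ++ y :: d.set p x = (u ++ [y]) ++ d.set p x by simp,
      List.take_left' (by simp [hulen]), List.drop_left' (by simp [hulen]), List.append_assoc]
    simp
  refine ⟨?_, ?_, ?_⟩
  · rw [hstep]
    conv_rhs => rw [ha]
    exact List.Perm.append_left u ((List.Perm.cons y (List.reverse_perm _)).trans hsetperm)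
  · rw [hstep]
    conv_lhs => rw [ha]
    exact lex_append_left u (List.Lex.rel hxy)
  · intro t htp htlt
    rw [hstep]
    rw [ha] at htp htlt
    exact key_min hesort ((List.Perm.cons y (List.reverse_perm _)).trans hsetperm) hdmax hminy u t htp htlt

theorem desc_of_scan_none {a : List Char} (h : (if 2 ≤ a.length then pvScanJ a (a.length - 2) else none) = none) :
    a.Pairwise (fun x y => y ≤ x) := by
  by_cases hlen : 2 ≤ a.length
  · rw [if_pos hlen] at h
    apply List.IsChain.pairwise
    rw [List.isChain_iff_getElem]
    intro i hi
    have := pvScanJ_none h i (by omega)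
    rw [List.getD_eq_getElem a ' ' (by omega), List.getD_eq_getElem a ' ' (by omega)] at this
    exact not_lt.1 this
  · rcases a with - | ⟨c1, - | ⟨c2, t⟩⟩
    · simp
    · simp
    · simp at hlen

-- ---- filter lemmas on strictly sorted lists ----
theorem filter_ge_step {L : List (List Char)} {a b : List Char}
    (hp : L.Pairwise (· < ·)) (ha : a ∈ L) (hab : a < b)
    (hmin : ∀ t ∈ L, a < t → b ≤ t) :
    L.filter (fun t => decide (a ≤ t)) = a :: L.filter (fun t => decide (b ≤ t)) := by
  induction L with
  | nil => simp at ha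
  | cons h L ih =>
    rcases hp with - | ⟨hh, hpL⟩
    by_cases hha : h = a
    · subst hha
      rw [List.filter_cons_of_pos (by simp)]
      congr 1
      · have h1 : L.filter (fun t => decide (h ≤ t)) = L := by
          apply List.filter_eq_self.2
          intro t htL
          simp [le_of_lt (hh t htL)]
        have h2 : L.filter (fun t => decide (b ≤ t)) = L := by
          apply List.filter_eq_self.2
          intro t htL
          simp [hmin t (List.mem_cons_of_mem _ htL) (hh t htL)]
        rw [h1, List.filter_cons_of_neg (by simp [not_le.2 hab]), h2]
    · have haL : a ∈ L := by
        rcases List.mem_cons.1 ha with h1 | h1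
        · exact absurd h1.symm hha
        · exact h1
      have hhlta : h < a := hh a haL
      rw [List.filter_cons_of_neg (by simp [not_le.2 hhlta]),
        List.filter_cons_of_neg (by simp [not_le.2 (lt_trans hhlta hab)])]
      exact ih hpL haL (fun t htL hat => hmin t (List.mem_cons_of_mem _ htL) hat)

theorem filter_ge_max {L : List (List Char)} {a : List Char}
    (hp : L.Pairwise (· < ·)) (ha : a ∈ L) (hmax : ∀ t ∈ L, t ≤ a) :
    L.filter (fun t => decide (a ≤ t)) = [a] := by
  induction L with
  | nil => simp at ha
  | cons h L ih =>
    rcases hp with - | ⟨hh, hpL⟩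
    by_cases hha : h = a
    · subst hha
      rw [List.filter_cons_of_pos (by simp)]
      congr 1
      apply List.filter_eq_nil_iff.2
      intro t htL
      exact absurd (hh t htL) (not_lt.2 (hmax t (List.mem_cons_of_mem _ htL)))
    · have haL : a ∈ L := by
        rcases List.mem_cons.1 ha with h1 | h1
        · exact absurd h1.symm hha
        · exact h1
      have hhlta : h < a := hh a haL
      rw [List.filter_cons_of_neg (by simp [not_le.2 hhlta])]
      exact ih hpL haL (fun t htL => hmax t (List.mem_cons_of_mem _ htL))

theorem filter_ge_all {L : List (List Char)} {a : List Char} (h : ∀ t ∈ L, a ≤ t) :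
    L.filter (fun t => decide (a ≤ t)) = L := by
  apply List.filter_eq_self.2
  intro t htL
  simp [h t htL]

-- ---- the main enumeration lemma ----
theorem pvLoop_eq (f : Nat) : ∀ (m a : List Char), m.Pairwise (· ≤ ·) → a.Perm m →
    ((permsS m).filter (fun t => decide (a ≤ t))).length ≤ f →
    pvLoop f a = ((permsS m).filter (fun t => decide (a ≤ t))).map String.ofList := by
  induction f with
  | zero =>
    intro m a hs hp hle
    exfalso
    have ha : a ∈ (permsS m).filter (fun t => decide (a ≤ t)) :=
      List.mem_filter.2 ⟨(mem_permsS hs a).2 hp, by simp⟩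
    have := List.length_pos_of_mem ha
    omega
  | succ f ih =>
    intro m a hs hp hle
    have haL : a ∈ permsS m := (mem_permsS hs a).2 hp
    have hpair := permsS_pairwise hs
    rw [pvLoop]
    rcases hg : (if 2 ≤ a.length then pvScanJ a (a.length - 2) else none) with - | j
    · -- no ascent: a is the lexicographically last permutation
      have hdesc := desc_of_scan_none hg
      have hmax : ∀ t ∈ permsS m, t ≤ a := by
        intro t ht
        exact desc_ge_perm hdesc t (((mem_permsS hs t).1 ht).trans hp.symm)
      rw [filter_ge_max hpair haL hmax]
      rfl
    · -- ascent found: one next-permutation step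
      have hlen2 : 2 ≤ a.length := by
        by_contra hc
        rw [if_neg hc] at hg
        cases hg
      rw [if_pos hlen2] at hg
      obtain ⟨hbp, hab, hmin⟩ := step_master hlen2 hg
      have hmin' : ∀ t ∈ permsS m, a < t → pvStep a j ≤ t := by
        intro t ht hat
        exact hmin t (((mem_permsS hs t).1 ht).trans hp.symm) hat
      have hsplit := filter_ge_step hpair haL hab hmin'
      have hlen' : ((permsS m).filter (fun t => decide (pvStep a j ≤ t))).length ≤ f := by
        have := congrArg List.length hsplit
        simp only [List.length_cons] at this
        omega
      have hred : (String.ofList a ::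
          match some j with
          | none => []
          | some j => pvLoop f (pvStep a j)) = String.ofList a :: pvLoop f (pvStep a j) := rfl
      rw [hred, ih m (pvStep a j) hs (hbp.trans hp) hlen', hsplit]
      rfl

-- ===== VERDICT (by name: the statement is the Claim_ definition above) =====
theorem lexicoPermute_spec : Claim_equal_lexicoPermute := by
  intro s _
  unfold Spec_lexicoPermute lexicoPermute lexicoPermute_alt
  have hs : (PySem.List.sorted s.toList (fun c => c) false).Pairwise (· ≤ ·) :=
    PySem.List.sorted_pairwise s.toList (fun c => c)
  set a0 := PySem.List.sorted s.toList (fun c => c) false with ha0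
  have hall : ∀ t ∈ permsS a0, a0 ≤ t := by
    intro t ht
    exact sorted_le_perm hs t ((mem_permsS hs t).1 ht)
  have hflt : (permsS a0).filter (fun t => decide (a0 ≤ t)) = permsS a0 := filter_ge_all hall
  have hlenb : ((permsS a0).filter (fun t => decide (a0 ≤ t))).length ≤ a0.length.factorial + 1 := by
    have h1 := List.length_filter_le (fun t => decide (a0 ≤ t)) (permsS a0)
    have h2 := permsS_length a0
    omega
  rw [pvLoop_eq (a0.length.factorial + 1) a0 a0 hs (List.Perm.refl a0) hlenb, hflt, pvGen_eq]
  apply List.map_congr_left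
  intro t _
  apply String.ext
  simp
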